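-- pv_equiv track=rewrite | github.com/together2329/brian_hw | common_ai_agent/core/tools.py | _indentation_flexible_replacer
-- ===== SOURCE A (Python) =====
-- def _indentation_flexible_replacer(content, find):
--     """
--     Strategy 5: Indentation-flexible matching.
--     Ignores absolute indentation, preserves relative indentation.
--     """
--     def remove_indentation(text):
--         lines = text.split('\n')
--         non_empty_lines = [line for line in lines if line.strip()]
--
--         if not non_empty_lines:
--             return text
--
--         # Find minimum indentation
--         min_indent = min(
--             len(line) - len(line.lstrip())
--             for line in non_empty_lines
--         )
--
--         # Remove minimum indentation from all lines
--         result_lines = []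
--         for line in lines:
--             if line.strip():
--                 result_lines.append(line[min_indent:] if len(line) >= min_indent else line)
--             else:
--                 result_lines.append(line)
--
--         return '\n'.join(result_lines)
--
--     normalized_find = remove_indentation(find)
--     content_lines = content.split('\n')
--     find_lines = find.split('\n')
--
--     for i in range(len(content_lines) - len(find_lines) + 1):
--         block = '\n'.join(content_lines[i:i + len(find_lines)])
--         if remove_indentation(block) == normalized_find:
--             yield block
-- ===== SOURCE B (Python) =====
-- def _indentation_flexible_replacer(content, find):
--     content_lines = content.split('\n')
--     find_lines = find.split('\n')
--     m = len(find_lines)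
--
--     # normalize find once, as a list of lines
--     f_ind = [len(l) - len(l.lstrip()) for l in find_lines if l.strip()]
--     if f_ind:
--         fmin = min(f_ind)
--         nf = [l if not l.strip() else l[fmin:] for l in find_lines]
--     else:
--         nf = find_lines
--
--     # anchor-and-verify: never dedent a window; the first non-blank line fixes
--     # the shift k, each other line is verified by length + suffix + indent checks
--     for i in range(len(content_lines) - m + 1):
--         w = content_lines[i:i + m]
--         pairs = list(zip(w, nf))
--         anchor = next((p for p in pairs if p[0].strip()), None)
--         if anchor is None:
--             ok = (w == nf)
--         else:
--             k = len(anchor[0]) - len(anchor[1])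
--             ok = k >= 0
--             seen = False
--             for c, f in pairs:
--                 if not ok:
--                     break
--                 if not c.strip():
--                     ok = (c == f)
--                 else:
--                     ind = len(c) - len(c.lstrip())
--                     ok = (len(c) == len(f) + k and c.endswith(f) and ind >= k)
--                     if ind == k:
--                         seen = True
--             ok = ok and seen
--         if ok:
--             yield '\n'.join(w)
-- ===== Notes on version B (the rewrite author's own statement) =====
-- stated objective: alternative
-- what changed: B never dedents a window: it normalizes find once into a line list, then for each window picks the first non-blank line as an anchor fixing a shift k = length difference, and verifies the window by per-line length/suffix(endswith)/indent>=k checks with one indent==k witness and literal equality on blank lines, with early exit on the first failing line, instead of A's building a dedented copy of every window via min-indent slicing and comparing whole joined strings.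
import Mathlib
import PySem

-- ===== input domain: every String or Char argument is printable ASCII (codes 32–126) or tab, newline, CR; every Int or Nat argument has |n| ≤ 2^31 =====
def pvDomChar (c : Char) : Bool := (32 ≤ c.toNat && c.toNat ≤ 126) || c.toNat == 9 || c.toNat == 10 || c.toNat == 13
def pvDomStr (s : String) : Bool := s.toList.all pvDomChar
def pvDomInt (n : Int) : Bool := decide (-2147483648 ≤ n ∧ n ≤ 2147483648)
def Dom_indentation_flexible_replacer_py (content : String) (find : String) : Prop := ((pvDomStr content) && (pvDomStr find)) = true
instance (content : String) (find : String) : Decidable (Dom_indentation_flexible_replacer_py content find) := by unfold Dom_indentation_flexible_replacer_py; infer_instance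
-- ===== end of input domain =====

-- B never dedents a window: the first non-blank window line anchors a shift k and every
-- line is verified by length/suffix/indent checks (early exit); return value proved identical.

-- ===== PORT A =====
-- A's nested helper remove_indentation, line for line.
def pvRemoveIndentation (text : List Char) : List Char :=
  let lines := PySem.Chars.splitOn text ['\n']
  let nonEmpty := lines.filter (fun line => !(PySem.Chars.strip line).isEmpty)
  if nonEmpty.isEmpty then text
  else
    match PySem.List.min? (nonEmpty.map (fun line => line.length - (PySem.Chars.lstrip line).length)) id with
    | none => text  -- unreachable: nonEmpty ≠ [] (Python's min is guarded the same way)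
    | some minIndent =>
      PySem.Chars.join ['\n']
        (lines.map (fun line =>
          if !(PySem.Chars.strip line).isEmpty then
            (if minIndent ≤ line.length then PySem.List.slice line (some (minIndent : Int)) none else line)
          else line))

def indentation_flexible_replacer_py (content : String) (find : String) : List String :=
  let normalized_find := pvRemoveIndentation find.toList
  let content_lines := PySem.Chars.splitOn content.toList ['\n']
  let find_lines := PySem.Chars.splitOn find.toList ['\n']
  (PySem.List.pyRange 0 ((content_lines.length : Int) - (find_lines.length : Int) + 1)).foldl
    (fun acc i =>
      let block := PySem.Chars.join ['\n']
        (PySem.List.slice content_lines (some i) (some (i + (find_lines.length : Int))))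
      if pvRemoveIndentation block = normalized_find then acc ++ [String.ofList block] else acc) []

-- ===== PORT B =====
-- Source B's inner verification loop over zip(w, nf): carries (ok, seen); `if not ok: break`
-- is ported as "state unchanged once ok is false" (nothing else is updated after a break).
def pvCheckLoop (k : Int) (pairs : List (List Char × List Char)) (ok seen : Bool) : Bool × Bool :=
  match pairs with
  | [] => (ok, seen)
  | (c, f) :: rest =>
    if !ok then (ok, seen)
    else if (PySem.Chars.strip c).isEmpty then pvCheckLoop k rest (c == f) seen
    else
      pvCheckLoop k rest
        (decide ((c.length : Int) = (f.length : Int) + k) && PySem.Chars.endswith c f &&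
          decide (k ≤ ((c.length - (PySem.Chars.lstrip c).length : Nat) : Int)))
        (seen || decide (((c.length - (PySem.Chars.lstrip c).length : Nat) : Int) = k))

-- Source B's per-window test: anchor pair fixes k, then the verification loop runs
def pvWindowOk (w nf : List (List Char)) : Bool :=
  match (w.zip nf).find? (fun p => !(PySem.Chars.strip p.1).isEmpty) with
  | none => w == nf
  | some a =>
    let k : Int := (a.1.length : Int) - (a.2.length : Int)
    let r := pvCheckLoop k (w.zip nf) (decide (0 ≤ k)) false
    r.1 && r.2

def indentation_flexible_replacer_py_alt (content : String) (find : String) : List String :=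
  let content_lines := PySem.Chars.splitOn content.toList ['\n']
  let find_lines := PySem.Chars.splitOn find.toList ['\n']
  let m := find_lines.length
  -- nf = normalized find as a list of lines (l[fmin:] = drop fmin, fmin ≥ 0)
  let nf : List (List Char) :=
    match PySem.List.min? ((find_lines.filter (fun l => !(PySem.Chars.strip l).isEmpty)).map
        (fun l => l.length - (PySem.Chars.lstrip l).length)) id with
    | some fmin => find_lines.map (fun l => if (PySem.Chars.strip l).isEmpty then l else List.drop fmin l)
    | none => find_lines
  (PySem.List.pyRange 0 ((content_lines.length : Int) - (m : Int) + 1)).foldl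
    (fun acc i =>
      let w := PySem.List.slice content_lines (some i) (some (i + (m : Int)))
      if pvWindowOk w nf then acc ++ [String.ofList (PySem.Chars.join ['\n'] w)] else acc) []

-- ===== PRECONDITION & SPEC =====
def Spec_indentation_flexible_replacer_py (content : String) (find : String) (out : List String) : Prop := out = indentation_flexible_replacer_py_alt content find
instance (content : String) (find : String) (out : List String) : Decidable (Spec_indentation_flexible_replacer_py content find out) := by unfold Spec_indentation_flexible_replacer_py; infer_instance

-- ===== CLAIM (what is proved, stated in full; the proofs are below) =====
def Claim_equal_indentation_flexible_replacer_py : Prop := ∀ (content : String) (find : String), Dom_indentation_flexible_replacer_py content find → Spec_indentation_flexible_replacer_py content find (indentation_flexible_replacer_py content find)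

-- ===== LEMMAS AND PROOFS =====

-- PySem's splitOn (fuelled) is core List.splitOn, for a one-character separator
theorem pvSplitGo (c : Char) (l cur : List Char) (acc : List (List Char)) (fuel : Nat) (h : l.length ≤ fuel) :
    PySem.Chars.splitOn.go [c] fuel l cur acc = acc.reverse ++ List.splitOnP.go (· == c) l cur := by
  induction l generalizing fuel cur acc with
  | nil => cases fuel <;> simp [PySem.Chars.splitOn.go, List.splitOnP.go]
  | cons a t ih =>
    cases fuel with
    | zero => simp at h
    | succ f =>
      simp only [List.length_cons, Nat.succ_le_succ_iff] at h
      simp only [PySem.Chars.splitOn.go, List.splitOnP.go]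
      by_cases hc : a = c
      · subst hc
        simp [List.isPrefixOf, ih _ _ _ h]
      · have : ([c].isPrefixOf (a :: t)) = false := by
          simp [List.isPrefixOf]; exact fun hh => (hc hh.symm).elim
        simp [this, beq_false_of_ne hc, ih _ _ _ h]

theorem pvSplitOn_single (c : Char) (s : List Char) :
    PySem.Chars.splitOn s [c] = List.splitOn c s := by
  simpa [PySem.Chars.splitOn, List.splitOn, List.splitOnP] using
    pvSplitGo c s [] [] (s.length + 1) (by omega)

theorem pvSplitOnP_go_ne_nil {α : Type} (P : α → Bool) (l acc : List α) :
    List.splitOnP.go P l acc ≠ [] := by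
  induction l generalizing acc with
  | nil => simp [List.splitOnP.go]
  | cons a t ih => simp only [List.splitOnP.go]; split <;> simp [ih]

theorem pvSplitOn_ne_nil (c : Char) (s : List Char) : PySem.Chars.splitOn s [c] ≠ [] := by
  rw [pvSplitOn_single]; exact pvSplitOnP_go_ne_nil _ _ _

theorem pvSplitOnP_go_not_mem {α : Type} [DecidableEq α] (c : α) (l acc : List α)
    (hacc : c ∉ acc) : ∀ p ∈ List.splitOnP.go (· == c) l acc, c ∉ p := by
  induction l generalizing acc with
  | nil => simpa [List.splitOnP.go] using hacc
  | cons a t ih =>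
    simp only [List.splitOnP.go]
    by_cases hc : a = c
    · subst hc
      simp only [beq_self_eq_true, if_true, List.mem_cons]
      rintro p (rfl | hp)
      · simpa using hacc
      · exact ih [] (by simp) p hp
    · simp only [beq_false_of_ne hc, Bool.false_eq_true, if_false]
      refine ih (a :: acc) ?_
      intro hmem
      rcases List.mem_cons.mp hmem with h | h
      · exact hc h.symm
      · exact hacc h

theorem pvSplitOn_not_mem (c : Char) (s : List Char) :
    ∀ p ∈ PySem.Chars.splitOn s [c], c ∉ p := by
  rw [pvSplitOn_single]
  exact pvSplitOnP_go_not_mem c s [] (by simp)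

-- splitting a join of newline-free, nonempty line list gives back the lines
theorem pvSplitOn_join (c : Char) (ls : List (List Char)) (hne : ls ≠ [])
    (hfree : ∀ l ∈ ls, c ∉ l) :
    PySem.Chars.splitOn (PySem.Chars.join [c] ls) [c] = ls := by
  rw [pvSplitOn_single, PySem.Chars.join]
  exact List.splitOn_intercalate ls c hfree hne

-- join is the other inverse: joining the split lines gives back the text
theorem pvJoin_splitOn (c : Char) (s : List Char) :
    PySem.Chars.join [c] (PySem.Chars.splitOn s [c]) = s := by
  rw [pvSplitOn_single]
  unfold PySem.Chars.join
  exact List.intercalate_splitOn s c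

-- join is injective on nonempty separator-free line lists
theorem pvJoin_inj (c : Char) (l l' : List (List Char)) (hl : l ≠ []) (hl' : l' ≠ [])
    (hf : ∀ x ∈ l, c ∉ x) (hf' : ∀ x ∈ l', c ∉ x) :
    PySem.Chars.join [c] l = PySem.Chars.join [c] l' ↔ l = l' := by
  constructor
  · intro h
    have h2 := congrArg (fun s => PySem.Chars.splitOn s [c]) h
    simpa [pvSplitOn_join c l hl hf, pvSplitOn_join c l' hl' hf'] using h2
  · intro h; rw [h]

-- closed form of A's remove_indentation: guard eliminated, filter/map normalised
theorem pvRI_spec (text : List Char) :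
    pvRemoveIndentation text =
      (match PySem.List.min? (((PySem.Chars.splitOn text ['\n']).filter
            (fun l => !(PySem.Chars.strip l).isEmpty)).map
            (fun l => l.length - (PySem.Chars.lstrip l).length)) id with
       | none => text
       | some mi =>
         PySem.Chars.join ['\n'] ((PySem.Chars.splitOn text ['\n']).map (fun l =>
           if (PySem.Chars.strip l).isEmpty then l else List.drop mi l))) := by
  unfold pvRemoveIndentation
  by_cases hE : (PySem.Chars.splitOn text ['\n']).filter
      (fun l => !(PySem.Chars.strip l).isEmpty) = []
  · simp [hE, PySem.List.min?]
  · simp only [List.isEmpty_iff, hE]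
    have hmap : ((PySem.Chars.splitOn text ['\n']).filter
        (fun l => !(PySem.Chars.strip l).isEmpty)).map
        (fun l => l.length - (PySem.Chars.lstrip l).length) ≠ [] := by
      simpa using hE
    obtain ⟨m, hm⟩ : ∃ m, PySem.List.min? (((PySem.Chars.splitOn text ['\n']).filter
        (fun l => !(PySem.Chars.strip l).isEmpty)).map
        (fun l => l.length - (PySem.Chars.lstrip l).length)) id = some m := by
      rcases h : PySem.List.min? _ id with _ | m
      · exact absurd ((PySem.List.min?_eq_none_iff _ _).mp h) hmap
      · exact ⟨m, rfl⟩
    rw [hm]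
    simp only [if_false]
    congr 1
    apply List.map_congr_left
    intro l hl
    by_cases hb : (PySem.Chars.strip l).isEmpty
    · rw [if_neg (by simp [hb]), if_pos (List.isEmpty_iff.mp hb)]
    · have hmem : l.length - (PySem.Chars.lstrip l).length ∈
          ((PySem.Chars.splitOn text ['\n']).filter
            (fun l => !(PySem.Chars.strip l).isEmpty)).map
            (fun l => l.length - (PySem.Chars.lstrip l).length) :=
        List.mem_map_of_mem (List.mem_filter.mpr ⟨hl, by simpa using hb⟩)
      have hle : m ≤ l.length - (PySem.Chars.lstrip l).length :=
        PySem.List.min?_isMin hm _ hmem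
      have hlen : m ≤ l.length := le_trans hle (Nat.sub_le _ _)
      simp only [hb, Bool.not_false, if_true, if_pos hlen]
      rw [PySem.List.slice_from l (by positivity)]
      simp only [Int.toNat_natCast]
      rw [if_neg (fun hc => absurd (List.isEmpty_iff.mpr hc) hb)]

-- the first component of a zip pair is a member of the first list
theorem pvZip_fst_mem {α β : Type} (l1 : List α) (l2 : List β) {a : α} {b : β}
    (h : (a, b) ∈ l1.zip l2) : a ∈ l1 := by
  induction l1 generalizing l2 with
  | nil => simp at h
  | cons x t ih =>
    cases l2 with
    | nil => simp at h
    | cons y s =>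
      simp only [List.zip_cons_cons, List.mem_cons, Prod.mk.injEq] at h
      rcases h with ⟨rfl, rfl⟩ | hm
      · exact List.mem_cons_self
      · exact List.mem_cons_of_mem _ (ih _ hm)

-- every element of w is the first component of some zip pair (lengths equal)
theorem pvZip_cover {α β : Type} (w : List α) (nf : List β) (hlen : w.length = nf.length)
    {c : α} (hc : c ∈ w) : ∃ f, (c, f) ∈ w.zip nf := by
  induction w generalizing nf with
  | nil => cases hc
  | cons a t ih =>
    cases nf with
    | nil => simp at hlen
    | cons b nt =>
      rcases List.mem_cons.mp hc with rfl | hc'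
      · exact ⟨b, by simp⟩
      · obtain ⟨f, hf⟩ := ih nt (by simpa using hlen) hc'
        exact ⟨f, List.mem_cons_of_mem _ hf⟩

-- mapped list equality is pairwise equality on the zip (lengths equal)
theorem pvMap_eq_iff_zip {α β : Type} (g : α → β) (w : List α) (nf : List β)
    (hlen : w.length = nf.length) :
    w.map g = nf ↔ ∀ p ∈ w.zip nf, g p.1 = p.2 := by
  induction w generalizing nf with
  | nil =>
    cases nf with
    | nil => simp
    | cons b nt => simp at hlen
  | cons a t ih =>
    cases nf with
    | nil => simp at hlen
    | cons b nt =>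
      simp only [List.map_cons, List.cons.injEq, List.zip_cons_cons, List.mem_cons]
      rw [ih nt (by simpa using hlen)]
      constructor
      · rintro ⟨h1, h2⟩ p hp
        rcases hp with rfl | hp
        · exact h1
        · exact h2 p hp
      · intro h
        exact ⟨h (a, b) (Or.inl rfl), fun p hp => h p (Or.inr hp)⟩

-- a suffix of matching length is the drop
theorem pvSuffix_drop (c f : List Char) (h : f <:+ c) :
    c.drop (c.length - f.length) = f := by
  obtain ⟨t, rfl⟩ := h; simp

-- what the verification loop computes
theorem pvCheckLoop_spec (k : Int) (pairs : List (List Char × List Char)) (ok seen : Bool) :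
    (((pvCheckLoop k pairs ok seen).1 && (pvCheckLoop k pairs ok seen).2) = true) ↔
      (ok = true ∧
       (∀ p ∈ pairs, if (PySem.Chars.strip p.1).isEmpty then p.1 = p.2
         else ((p.1.length : Int) = (p.2.length : Int) + k ∧ p.2 <:+ p.1 ∧
               k ≤ ((p.1.length - (PySem.Chars.lstrip p.1).length : Nat) : Int))) ∧
       (seen = true ∨ ∃ p ∈ pairs, ¬((PySem.Chars.strip p.1).isEmpty = true) ∧
          ((p.1.length - (PySem.Chars.lstrip p.1).length : Nat) : Int) = k)) := by
  induction pairs generalizing ok seen with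
  | nil => cases ok <;> cases seen <;> simp [pvCheckLoop]
  | cons p rest ih =>
    obtain ⟨c, f⟩ := p
    cases ok with
    | false => simp [pvCheckLoop]
    | true =>
      by_cases hb : (PySem.Chars.strip c).isEmpty
      all_goals
        simp only [pvCheckLoop, hb, Bool.not_true, Bool.false_eq_true, if_false,
          if_true, ih, List.forall_mem_cons, List.exists_mem_cons_iff, beq_iff_eq,
          Bool.and_eq_true, decide_eq_true_eq, Bool.or_eq_true, PySem.Chars.endswith_iff]
      all_goals tauto

-- the per-window heart: A's "dedent then compare" equals B's "anchor then verify"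
theorem pvWindow_equiv (w nf : List (List Char)) (hlen : w.length = nf.length) :
    ((match PySem.List.min? ((w.filter (fun l => !(PySem.Chars.strip l).isEmpty)).map
          (fun l => l.length - (PySem.Chars.lstrip l).length)) id with
      | none => w
      | some wmin => w.map (fun l => if (PySem.Chars.strip l).isEmpty then l else List.drop wmin l)) = nf)
    ↔ (pvWindowOk w nf = true) := by
  rcases hfind : (w.zip nf).find? (fun p => !(PySem.Chars.strip p.1).isEmpty) with _ | a
  · -- no non-blank line in the window
    have hall : ∀ c ∈ w, (PySem.Chars.strip c).isEmpty = true := by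
      intro c hc
      obtain ⟨f, hf⟩ := pvZip_cover w nf hlen hc
      have := List.find?_eq_none.mp hfind _ hf
      simpa using this
    have hfilt : w.filter (fun l => !(PySem.Chars.strip l).isEmpty) = [] := by
      rw [List.filter_eq_nil_iff]
      intro c hc; simp [hall c hc]
    rw [hfilt]
    simp [pvWindowOk, hfind, PySem.List.min?, beq_iff_eq]
  · -- anchor a = (c0, f0)
    obtain ⟨c0, f0⟩ := a
    have hmem0 : (c0, f0) ∈ w.zip nf := List.mem_of_find?_eq_some hfind
    have hnb0 : ¬((PySem.Chars.strip c0).isEmpty = true) := by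
      have := List.find?_some hfind; simpa using this
    have hc0w : c0 ∈ w := pvZip_fst_mem w nf hmem0
    have hc0f : c0 ∈ w.filter (fun l => !(PySem.Chars.strip l).isEmpty) :=
      List.mem_filter.mpr ⟨hc0w, by simpa using hnb0⟩
    have hne : (w.filter (fun l => !(PySem.Chars.strip l).isEmpty)).map
        (fun l => l.length - (PySem.Chars.lstrip l).length) ≠ [] := by
      intro h
      rw [List.map_eq_nil_iff] at h
      rw [h] at hc0f; cases hc0f
    obtain ⟨wmin, hwmin⟩ : ∃ m, PySem.List.min? ((w.filter (fun l => !(PySem.Chars.strip l).isEmpty)).map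
        (fun l => l.length - (PySem.Chars.lstrip l).length)) id = some m := by
      rcases h : PySem.List.min? _ id with _ | m
      · exact absurd ((PySem.List.min?_eq_none_iff _ _).mp h) hne
      · exact ⟨m, rfl⟩
    have hwmin_le : ∀ c ∈ w, ¬((PySem.Chars.strip c).isEmpty = true) →
        wmin ≤ c.length - (PySem.Chars.lstrip c).length := by
      intro c hc hnb
      exact PySem.List.min?_isMin hwmin _
        (List.mem_map_of_mem (List.mem_filter.mpr ⟨hc, by simpa using hnb⟩))
    obtain ⟨cm, hcmF, hcmE⟩ : ∃ c ∈ w.filter (fun l => !(PySem.Chars.strip l).isEmpty),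
        c.length - (PySem.Chars.lstrip c).length = wmin := by
      have := PySem.List.min?_mem hwmin
      obtain ⟨c, hc, hce⟩ := List.mem_map.mp this
      exact ⟨c, hc, hce⟩
    have hcmW : cm ∈ w := (List.mem_filter.mp hcmF).1
    have hcmNB : ¬((PySem.Chars.strip cm).isEmpty = true) := by
      have := (List.mem_filter.mp hcmF).2; simpa using this
    simp only [pvWindowOk, hfind, hwmin]
    rw [pvCheckLoop_spec,
      pvMap_eq_iff_zip (fun l => if (PySem.Chars.strip l).isEmpty then l else List.drop wmin l) w nf hlen]
    constructor
    · -- A matches ⇒ B's checks pass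
      intro hpt
      have h0 := hpt (c0, f0) hmem0
      simp only [hnb0] at h0
      have hwle0 : wmin ≤ c0.length :=
        le_trans (hwmin_le c0 hc0w hnb0) (Nat.sub_le _ _)
      have hlen0 : f0.length = c0.length - wmin := by
        rw [← h0]; simp
      have hk : (c0.length : Int) - (f0.length : Int) = (wmin : Int) := by
        omega
      refine ⟨by simp [hk], ?_, ?_⟩
      · intro p hp
        have hq := hpt p hp
        by_cases hb : (PySem.Chars.strip p.1).isEmpty
        · simpa [hb] using hq
        · simp only [hb, if_false, Bool.false_eq_true] at hq ⊢
          have hple : wmin ≤ p.1.length :=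
            le_trans (hwmin_le p.1 (pvZip_fst_mem w nf (by rwa [← Prod.mk.eta (p := p)] at hp))
              (by simpa using hb)) (Nat.sub_le _ _)
          have hlenp : p.2.length = p.1.length - wmin := by rw [← hq]; simp
          refine ⟨by omega, ?_, ?_⟩
          · rw [← hq]; exact List.drop_suffix _ _
          · have := hwmin_le p.1 (pvZip_fst_mem w nf (by rwa [← Prod.mk.eta (p := p)] at hp))
              (by simpa using hb)
            omega
      · obtain ⟨fm, hfm⟩ := pvZip_cover w nf hlen hcmW
        exact Or.inr ⟨(cm, fm), hfm, hcmNB, by rw [hcmE, hk]⟩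
    · -- B's checks pass ⇒ A matches
      rintro ⟨hk0, hall, hseen⟩
      have hk0' : (0 : Int) ≤ (c0.length : Int) - (f0.length : Int) := by simpa using hk0
      rcases hseen with h | ⟨q, hq, hqNB, hqk⟩
      · exact absurd h (by simp)
      · -- wmin = k
        have hwmin_eq : (wmin : Int) = (c0.length : Int) - (f0.length : Int) := by
          have h1 : wmin ≤ q.1.length - (PySem.Chars.lstrip q.1).length :=
            hwmin_le q.1 (pvZip_fst_mem w nf (by rwa [← Prod.mk.eta (p := q)] at hq)) hqNB
          have h2 : (c0.length : Int) - (f0.length : Int) ≤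
              ((cm.length - (PySem.Chars.lstrip cm).length : Nat) : Int) := by
            obtain ⟨fm, hfm⟩ := pvZip_cover w nf hlen hcmW
            have := hall (cm, fm) hfm
            simp only [hcmNB] at this
            exact this.2.2
          omega
        intro p hp
        by_cases hb : (PySem.Chars.strip p.1).isEmpty
        · have := hall p hp; simpa [hb] using this
        · have hq' := hall p hp
          simp only [hb, if_false, Bool.false_eq_true] at hq' ⊢
          obtain ⟨hlenp, hsuf, -⟩ := hq'
          have hdrop := pvSuffix_drop p.1 p.2 hsuf
          have : p.1.length - p.2.length = wmin := by omega
          rw [← this]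
          exact hdrop

-- ===== VERDICT (by name: the statement is the Claim_ definition above) =====
theorem indentation_flexible_replacer_py_spec : Claim_equal_indentation_flexible_replacer_py := by
  intro content find _
  unfold Spec_indentation_flexible_replacer_py
  simp only [indentation_flexible_replacer_py, indentation_flexible_replacer_py_alt]
  refine PySem.List.foldl_congr_mem _ _ _ _ ?_
  intro acc i hi
  obtain ⟨hi0, hiu⟩ := PySem.List.mem_pyRange_one.mp hi
  have hm1 : 1 ≤ (PySem.Chars.splitOn find.toList ['\n']).length :=
    List.length_pos_iff.mpr (pvSplitOn_ne_nil '\n' find.toList)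
  have ha : i = ((i.toNat : Nat) : Int) := (Int.toNat_of_nonneg hi0).symm
  have ham : i.toNat + (PySem.Chars.splitOn find.toList ['\n']).length ≤
      (PySem.Chars.splitOn content.toList ['\n']).length := by omega
  -- the window as take/drop
  have hslice : PySem.List.slice (PySem.Chars.splitOn content.toList ['\n']) (some i)
      (some (i + ((PySem.Chars.splitOn find.toList ['\n']).length : Int))) =
      ((PySem.Chars.splitOn content.toList ['\n']).drop i.toNat).take
        (PySem.Chars.splitOn find.toList ['\n']).length := by
    rw [ha]
    have hc : (((i.toNat : Nat) : Int) + ((PySem.Chars.splitOn find.toList ['\n']).length : Int)) =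
        (((i.toNat + (PySem.Chars.splitOn find.toList ['\n']).length : Nat)) : Int) := by push_cast; ring
    rw [hc, PySem.List.slice_natCast]
    congr 1
    omega
  set w := ((PySem.Chars.splitOn content.toList ['\n']).drop i.toNat).take
      (PySem.Chars.splitOn find.toList ['\n']).length with hwdef
  have hwlen : w.length = (PySem.Chars.splitOn find.toList ['\n']).length := by
    simp only [hwdef, List.length_take, List.length_drop]
    omega
  have hwne : w ≠ [] := by
    intro h
    rw [h] at hwlen
    simp at hwlen
    omega
  have hwfree : ∀ l ∈ w, '\n' ∉ l :=
    fun l hl => pvSplitOn_not_mem '\n' content.toList l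
      (List.mem_of_mem_drop (List.mem_of_mem_take hl))
  have hffree : ∀ l ∈ PySem.Chars.splitOn find.toList ['\n'], '\n' ∉ l :=
    pvSplitOn_not_mem '\n' find.toList
  have hfne : PySem.Chars.splitOn find.toList ['\n'] ≠ [] := pvSplitOn_ne_nil '\n' find.toList
  -- nf: B's normalized find line list; A's normalized_find string is its join
  set nf : List (List Char) :=
    match PySem.List.min? (((PySem.Chars.splitOn find.toList ['\n']).filter
        (fun l => !(PySem.Chars.strip l).isEmpty)).map
        (fun l => l.length - (PySem.Chars.lstrip l).length)) id with
    | some fmin => (PySem.Chars.splitOn find.toList ['\n']).map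
        (fun l => if (PySem.Chars.strip l).isEmpty then l else List.drop fmin l)
    | none => PySem.Chars.splitOn find.toList ['\n'] with hnfdef
  have hnffree : ∀ l ∈ nf, '\n' ∉ l := by
    rw [hnfdef]
    rcases PySem.List.min? _ id with _ | fmin
    · exact hffree
    · intro l hl
      obtain ⟨l0, hl0, rfl⟩ := List.mem_map.mp hl
      by_cases hb : (PySem.Chars.strip l0).isEmpty
      · simpa [hb] using hffree l0 hl0
      · simp only [hb, if_false, Bool.false_eq_true]
        intro hc
        exact hffree l0 hl0 (List.mem_of_mem_drop hc)
  have hnflen : nf.length = (PySem.Chars.splitOn find.toList ['\n']).length := by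
    rw [hnfdef]
    rcases PySem.List.min? _ id with _ | fmin <;> simp
  have hnfne : nf ≠ [] := by
    intro h; rw [h] at hnflen; simp at hnflen; omega
  have hnf : pvRemoveIndentation find.toList = PySem.Chars.join ['\n'] nf := by
    rw [pvRI_spec find.toList, hnfdef]
    rcases PySem.List.min? _ id with _ | fmin
    · exact (pvJoin_splitOn '\n' find.toList).symm
    · rfl
  rw [hslice, hnf]
  -- reduce A's string comparison to a list comparison, then apply the window lemma
  have hAiff :
      (pvRemoveIndentation (PySem.Chars.join ['\n'] w) = PySem.Chars.join ['\n'] nf) ↔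
      (pvWindowOk w nf = true) := by
    rw [pvRI_spec, pvSplitOn_join '\n' w hwne hwfree]
    rw [← pvWindow_equiv w nf (by rw [hwlen, hnflen])]
    rcases PySem.List.min? ((w.filter (fun l => !(PySem.Chars.strip l).isEmpty)).map
        (fun l => l.length - (PySem.Chars.lstrip l).length)) id with _ | wmin
    · exact pvJoin_inj '\n' w nf hwne hnfne hwfree hnffree
    · refine pvJoin_inj '\n' _ nf ?_ hnfne ?_ hnffree
      · intro h; rw [List.map_eq_nil_iff] at h; exact hwne h
      · intro l hl
        obtain ⟨l0, hl0, rfl⟩ := List.mem_map.mp hl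
        by_cases hb : (PySem.Chars.strip l0).isEmpty
        · simpa [hb] using hwfree l0 hl0
        · simp only [hb, if_false, Bool.false_eq_true]
          intro hc
          exact hwfree l0 hl0 (List.mem_of_mem_drop hc)
  exact if_congr hAiff rfl rfl
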